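-- pv_equiv track=rewrite | github.com/hghyhghy/Codechef-Coding-Ninja | Desktop/DSA/T68/6.py | first_and_last_position
-- ===== SOURCE A (Python) =====
-- def first_and_last_position(array:list,x:int)->int:
--
--     first=-1
--     last=-1
--     n=len(array)
--
--     for i in range(n):
--
--         if array[i] == x:
--
--             first =  i
--             break
--
--
--     for j in range(n-1,-1,-1):
--
--         if array[j] == x:
--
--             last = j
--             break
--
--
--     return first,last
-- ===== SOURCE B (Python) =====
-- def first_and_last_position(array: list, x: int) -> int:
--     # single forward pass maintaining both indices
--     first = -1
--     last = -1
--     for i, v in enumerate(array):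
--         if v == x:
--             if first == -1:
--                 first = i
--             last = i
--     return first, last
-- ===== Notes on version B (the rewrite author's own statement) =====
-- stated objective: simpler
-- what changed: Replaced A's two break-on-match scans (one forward, one backward over index ranges) by a single forward enumerate pass that maintains both the first and last matching index.
import Mathlib
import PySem

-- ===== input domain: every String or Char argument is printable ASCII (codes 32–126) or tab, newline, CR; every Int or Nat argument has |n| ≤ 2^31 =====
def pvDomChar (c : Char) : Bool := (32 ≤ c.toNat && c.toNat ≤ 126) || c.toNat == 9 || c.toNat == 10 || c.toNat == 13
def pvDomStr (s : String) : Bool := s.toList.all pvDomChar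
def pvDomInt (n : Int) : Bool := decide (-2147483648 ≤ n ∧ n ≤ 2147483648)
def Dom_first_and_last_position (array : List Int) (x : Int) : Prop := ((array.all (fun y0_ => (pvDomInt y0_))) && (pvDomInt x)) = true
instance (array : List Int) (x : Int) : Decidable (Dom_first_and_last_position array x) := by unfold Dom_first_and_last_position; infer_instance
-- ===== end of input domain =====

-- B replaces A's two break-on-match directional scans by one forward pass keeping both indices (objective: simpler).

-- ===== PORT A =====
-- A's two loops are the identical break-on-first-match scan, only over different index ranges;
-- pvScanBreak is that loop body, recursing over the index list.
def pvScanBreak (array : List Int) (x : Int) : List Int → Int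
  | [] => -1
  | i :: rest => if PySem.List.pyGetD array i 0 == x then i else pvScanBreak array x rest

def first_and_last_position (array : List Int) (x : Int) : Int × Int :=
  let n : Int := array.length
  let first := pvScanBreak array x (PySem.List.pyRange 0 n 1)
  let last := pvScanBreak array x (PySem.List.pyRange (n - 1) (-1) (-1))
  (first, last)

-- ===== PORT B =====
def first_and_last_position_alt (array : List Int) (x : Int) : Int × Int :=
  (PySem.List.enumerate array 0).foldl
    (fun p iv =>
      if iv.2 == x then
        ((if p.1 == -1 then iv.1 else p.1), iv.1)
      else p)
    (-1, -1)

-- ===== PRECONDITION & SPEC =====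
def Spec_first_and_last_position (array : List Int) (x : Int) (out : Int × Int) : Prop := out = first_and_last_position_alt array x
instance (array : List Int) (x : Int) (out : Int × Int) : Decidable (Spec_first_and_last_position array x out) := by unfold Spec_first_and_last_position; infer_instance

-- ===== CLAIM (what is proved, stated in full; the proofs are below) =====
def Claim_equal_first_and_last_position : Prop := ∀ (array : List Int) (x : Int), Dom_first_and_last_position array x → Spec_first_and_last_position array x (first_and_last_position array x)

-- ===== LEMMAS AND PROOFS =====

theorem pvRevNone {l : List Int} {p : Int → Bool} :
    l.reverse.findIdx? p = none ↔ l.findIdx? p = none := by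
  simp [List.findIdx?_eq_none_iff]

theorem pvScan_asc (array : List Int) (x : Int) :
    ∀ (d a : Nat), array.length = a + d →
      pvScanBreak array x (PySem.List.pyRange a array.length 1) =
        (match (array.drop a).findIdx? (· == x) with
          | none => -1
          | some k => ((a + k : Nat) : Int)) := by
  intro d
  induction d with
  | zero =>
    intro a h
    rw [PySem.List.pyRange_one_eq_nil (by omega)]
    rw [List.drop_of_length_le (by omega)]
    simp [pvScanBreak]
  | succ d ih =>
    intro a h
    have ha : a < array.length := by omega
    rw [PySem.List.pyRange_one_cons (by exact_mod_cast ha)]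
    rw [List.drop_eq_getElem_cons ha, List.findIdx?_cons]
    simp only [pvScanBreak, PySem.List.pyGetD_natCast, List.getD_eq_getElem?_getD,
      List.getElem?_eq_getElem ha, Option.getD_some]
    by_cases hx : array[a] == x
    · simp [hx]
    · simp only [hx, if_neg, Bool.false_eq_true, if_false]
      have := ih (a + 1) (by omega)
      push_cast at this ⊢
      rw [this]
      rcases hfi : (array.drop (a + 1)).findIdx? (· == x) with _ | k <;> simp <;> push_cast <;> ring

theorem pvScan_desc (array : List Int) (x : Int) :
    ∀ (a : Nat), a ≤ array.length →
      pvScanBreak array x (PySem.List.pyRange ((a : Int) - 1) (-1) (-1)) =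
        (match (array.take a).reverse.findIdx? (· == x) with
          | none => -1
          | some m => ((a : Int) - 1 - m)) := by
  intro a
  induction a with
  | zero =>
    intro _
    rw [PySem.List.pyRange_neg_one_eq_nil (by omega)]
    simp [pvScanBreak]
  | succ a ih =>
    intro h
    have ha : a < array.length := by omega
    have hcast : ((a : Int) + 1 - 1) = (a : Int) := by ring
    push_cast
    rw [hcast, PySem.List.pyRange_neg_one_cons (by omega)]
    rw [List.take_add_one, List.getElem?_eq_getElem ha]
    simp only [Option.toList_some, List.reverse_append, List.reverse_singleton,
      List.singleton_append, List.findIdx?_cons]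
    simp only [pvScanBreak, PySem.List.pyGetD_natCast, List.getD_eq_getElem?_getD,
      List.getElem?_eq_getElem ha, Option.getD_some]
    by_cases hx : array[a] == x
    · simp [hx]
    · simp only [hx, Bool.false_eq_true, if_false]
      have := ih (by omega)
      rw [this]
      rcases hfi : (array.take a).reverse.findIdx? (· == x) with _ | m <;> simp <;> push_cast <;> ring

theorem pvFoldB (x : Int) :
    ∀ (l : List Int) (s f last : Int), 0 ≤ s →
      (PySem.List.enumerate l s).foldl
        (fun p iv =>
          if iv.2 == x then
            ((if p.1 == -1 then iv.1 else p.1), iv.1)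
          else p) (f, last) =
        (match l.findIdx? (· == x), l.reverse.findIdx? (· == x) with
          | some k, some m => ((if f == -1 then s + (k : Int) else f), s + (l.length : Int) - 1 - m)
          | _, _ => (f, last)) := by
  intro l
  induction l with
  | nil => intro s f last _; simp [PySem.List.enumerate]
  | cons y l ih =>
    intro s f last hs
    rw [PySem.List.enumerate_cons, List.foldl_cons]
    simp only [List.findIdx?_cons, List.reverse_cons, List.findIdx?_append]
    by_cases hy : y == x
    · simp only [hy, if_true]
      have hstep : (PySem.List.enumerate l (s + 1)).foldl
          (fun p iv => if iv.2 == x then ((if p.1 == -1 then iv.1 else p.1), iv.1) else p)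
          ((if f == -1 then s else f), s) = _ := ih (s + 1) _ s (by omega)
      rw [hstep]
      have hf' : (((if f == -1 then s else f) == (-1 : Int))) = false := by
        by_cases hf : f == -1
        · simp only [hf, if_true, beq_eq_false_iff_ne]; omega
        · rw [if_neg hf]; simpa using hf
      rcases h1 : l.findIdx? (· == x) with _ | k
      · have h2 : l.reverse.findIdx? (· == x) = none := pvRevNone.mpr h1
        simp only [h1, h2, hf', Option.map_none, Option.none_or]
        simp only [hy, List.findIdx?_cons, if_true, Option.map_some, Nat.zero_add,
          Prod.mk.injEq]
        constructor
        · by_cases hf : f == -1 <;> simp [hf]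
        · push_cast [List.length_reverse, List.length_cons]; omega
      · rcases h2' : l.reverse.findIdx? (· == x) with _ | m
        · simp [pvRevNone.mp h2'] at h1
        · simp only [h1, h2', hf', Option.some_or, Bool.false_eq_true, if_false,
            Prod.mk.injEq]
          constructor
          · by_cases hf : f == -1 <;> simp [hf]
          · push_cast [List.length_reverse, List.length_cons]; omega
    · simp only [hy, Bool.false_eq_true, if_false]
      rw [ih (s + 1) f last (by omega)]
      have hy1 : List.findIdx? (· == x) [y] = none := by simp [List.findIdx?_cons, hy]
      rcases h1 : l.findIdx? (· == x) with _ | k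
      · have h2 : l.reverse.findIdx? (· == x) = none := pvRevNone.mpr h1
        simp [h1, h2, hy1]
      · rcases h2' : l.reverse.findIdx? (· == x) with _ | m
        · simp [pvRevNone.mp h2'] at h1
        · simp only [List.findIdx?_nil, Option.map_none, Option.map_some, Option.or_none,
            Prod.mk.injEq, List.length_cons]
          constructor
          · by_cases hf : f == -1 <;> simp [hf] <;> push_cast <;> ring
          · push_cast; ring



-- ===== VERDICT (by name: the statement is the Claim_ definition above) =====
theorem first_and_last_position_spec : Claim_equal_first_and_last_position := by
  intro array x _
  unfold Spec_first_and_last_position first_and_last_position first_and_last_position_alt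
  dsimp only
  rw [pvFoldB x array 0 (-1) (-1) le_rfl]
  have hA1 := pvScan_asc array x array.length 0 (by omega)
  have hA2 := pvScan_desc array x array.length le_rfl
  simp only [List.drop_zero, Nat.cast_zero] at hA1
  simp only [List.take_length] at hA2
  rw [hA1, hA2]
  rcases h1 : array.findIdx? (· == x) with _ | k <;>
    rcases h2 : array.reverse.findIdx? (· == x) with _ | m
  · rfl
  · simp [pvRevNone.mpr h1] at h2
  · simp [pvRevNone.mp h2] at h1
  · simp only [Prod.mk.injEq]
    constructor
    · simp
    · push_cast; ring
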